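-- pv_equiv track=rewrite | github.com/DanteMarone/Cerebro | automation_sequences.py | _find_matching_block_end
-- ===== SOURCE A (Python) =====
-- from typing import List, Dict, Any, Literal, Union
--
-- def _find_matching_block_end(
--     steps: List[Dict[str, Any]],
--     current_index: int,
--     open_type: str,
--     close_type: str,
--     intermediate_type: Union[str, None] = None
-- ) -> Union[int, None]:
--     """
--     Finds the index of the matching close_type or intermediate_type for an open_type.
--     Skips nested structures of the same open_type.
--     `current_index` is the index of the `open_type` step itself.
--     """
--     level = 1
--     search_index = current_index + 1
--     while search_index < len(steps):
--         step = steps[search_index]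
--         s_type = step.get("type")
--
--         if s_type == open_type:
--             level += 1
--         elif intermediate_type and s_type == intermediate_type and level == 1:
--             return search_index # Found intermediate (e.g., Else) at the correct level
--         elif s_type == close_type:
--             level -= 1
--             if level == 0:
--                 return search_index # Found matching close (e.g., EndIf)
--
--         search_index += 1
--     return None # Not found
-- ===== SOURCE B (Python) =====
-- def _find_matching_block_end(steps, current_index, open_type, close_type, intermediate_type=None):
--     n = len(steps)
--
--     def find_close(i):
--         # Index of the close_type matching an already-open block, ignoring intermediates.
--         while i < n:
--             t = steps[i].get("type")
--             if t == open_type: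
--                 j = find_close(i + 1)
--                 if j is None:
--                     return None
--                 i = j + 1
--             elif t == close_type:
--                 return i
--             else:
--                 i += 1
--         return None
--
--     i = current_index + 1
--     while i < n:
--         t = steps[i].get("type")
--         if t == open_type:
--             j = find_close(i + 1)
--             if j is None:
--                 return None
--             i = j + 1
--         elif intermediate_type and t == intermediate_type:
--             return i
--         elif t == close_type:
--             return i
--         else:
--             i += 1
--     return None
-- ===== Notes on version B (the rewrite author's own statement) =====
-- stated objective: alternative
-- what changed: Replaces the flat level counter with structural recursion over the nesting: a helper find_close skips each nested block by recursively locating its matching close (ignoring intermediates), while the top-level scan alone can return an intermediate.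
import Mathlib
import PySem

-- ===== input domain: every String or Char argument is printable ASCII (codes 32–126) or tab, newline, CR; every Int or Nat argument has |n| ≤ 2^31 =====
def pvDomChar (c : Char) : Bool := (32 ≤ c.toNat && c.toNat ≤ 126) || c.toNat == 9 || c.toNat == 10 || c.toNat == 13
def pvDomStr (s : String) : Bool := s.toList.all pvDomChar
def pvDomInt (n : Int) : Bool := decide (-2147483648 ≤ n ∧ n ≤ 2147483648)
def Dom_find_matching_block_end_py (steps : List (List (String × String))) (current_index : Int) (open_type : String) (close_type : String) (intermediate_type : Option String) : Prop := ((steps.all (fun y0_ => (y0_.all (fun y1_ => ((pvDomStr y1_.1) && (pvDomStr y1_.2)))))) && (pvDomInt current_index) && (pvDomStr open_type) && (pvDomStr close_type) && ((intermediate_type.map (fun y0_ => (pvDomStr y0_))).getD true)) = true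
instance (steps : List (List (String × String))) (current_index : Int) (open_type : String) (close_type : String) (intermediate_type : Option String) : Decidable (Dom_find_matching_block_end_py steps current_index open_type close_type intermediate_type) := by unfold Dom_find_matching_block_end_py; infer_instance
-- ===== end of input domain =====

-- B replaces A's flat level counter with structural recursion over the nesting (objective: alternative, same cost).

-- step.get("type"): first binding of the key "type" in the association list (shared by both ports)
def pvStype (step : List (String × String)) : Option String :=
  (step.find? (fun kv => kv.1 == "type")).map (·.2)

-- Python truthiness test 'intermediate_type and s_type == intermediate_type' (shared by both ports)
def pvInterHit (intermediate_type : Option String) (t : Option String) : Bool :=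
  match intermediate_type with
  | none => false
  | some it => !(it == "") && (t == some it)

-- ===== PORT A =====
-- the while loop, fuel = exact remaining iteration count + 1
def pvAgo (steps : List (List (String × String))) (open_type close_type : String)
    (intermediate_type : Option String) : Nat → Int → Int → Option Int
  | 0, _, _ => none
  | fuel+1, level, si =>
    if si < (steps.length : Int) then
      match PySem.List.pyGet? steps si with
      | none => none     -- IndexError in Python (excluded by Pre_)
      | some step =>
        let t := pvStype step
        if t = some open_type then
          pvAgo steps open_type close_type intermediate_type fuel (level + 1) (si + 1)
        else if pvInterHit intermediate_type t && level == 1 then some si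
        else if t = some close_type then
          (if level - 1 = 0 then some si
           else pvAgo steps open_type close_type intermediate_type fuel (level - 1) (si + 1))
        else pvAgo steps open_type close_type intermediate_type fuel level (si + 1)
    else none

def find_matching_block_end_py (steps : List (List (String × String))) (current_index : Int) (open_type : String) (close_type : String) (intermediate_type : Option String) : Option Int :=
  pvAgo steps open_type close_type intermediate_type
    (((steps.length : Int) - (current_index + 1)).toNat + 1) 1 (current_index + 1)

-- ===== PORT B =====
-- find_close: index of the close_type matching an already-open block, ignoring intermediates
def pvBfind (steps : List (List (String × String))) (open_type close_type : String) :
    Nat → Int → Option Int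
  | 0, _ => none
  | fuel+1, i =>
    if i < (steps.length : Int) then
      match PySem.List.pyGet? steps i with
      | none => none     -- IndexError in Python (excluded by Pre_)
      | some step =>
        let t := pvStype step
        if t = some open_type then
          match pvBfind steps open_type close_type fuel (i + 1) with
          | none => none
          | some j => pvBfind steps open_type close_type fuel (j + 1)
        else if t = some close_type then some i
        else pvBfind steps open_type close_type fuel (i + 1)
    else none

-- the top-level scan of B
def pvBtop (steps : List (List (String × String))) (open_type close_type : String)
    (intermediate_type : Option String) : Nat → Int → Option Int
  | 0, _ => none
  | fuel+1, i =>
    if i < (steps.length : Int) then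
      match PySem.List.pyGet? steps i with
      | none => none     -- IndexError in Python (excluded by Pre_)
      | some step =>
        let t := pvStype step
        if t = some open_type then
          match pvBfind steps open_type close_type fuel (i + 1) with
          | none => none
          | some j => pvBtop steps open_type close_type intermediate_type fuel (j + 1)
        else if pvInterHit intermediate_type t then some i
        else if t = some close_type then some i
        else pvBtop steps open_type close_type intermediate_type fuel (i + 1)
    else none

def find_matching_block_end_py_alt (steps : List (List (String × String))) (current_index : Int) (open_type : String) (close_type : String) (intermediate_type : Option String) : Option Int :=
  pvBtop steps open_type close_type intermediate_type
    (((steps.length : Int) - (current_index + 1)).toNat + 1) (current_index + 1)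

-- ===== PRECONDITION & SPEC =====
-- Pre_ excludes (i) the inputs where Python A raises IndexError — a start index current_index+1
-- below -len(steps), out of range even for Python's negative indexing — and (ii) steps whose
-- association list binds the key "type" more than once: no Python dict has duplicate keys, so the
-- first-vs-last choice there is made by the list encoding, and no call of the Python function reaches it.
def Pre_find_matching_block_end_py (steps : List (List (String × String))) (current_index : Int) (open_type : String) (close_type : String) (intermediate_type : Option String) : Prop :=
  -(steps.length : Int) ≤ current_index + 1 ∧
  ∀ st ∈ steps, (st.map Prod.fst).count "type" ≤ 1
instance (steps : List (List (String × String))) (current_index : Int) (open_type : String) (close_type : String) (intermediate_type : Option String) : Decidable (Pre_find_matching_block_end_py steps current_index open_type close_type intermediate_type) := by unfold Pre_find_matching_block_end_py; infer_instance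

def pvWitness_find_matching_block_end_py : (List (List (String × String))) × Int × String × String × Option String :=
  ([[("type", "If")], [("type", "Else")], [("type", "EndIf")]], 0, "If", "EndIf", some "Else")

def Spec_find_matching_block_end_py (steps : List (List (String × String))) (current_index : Int) (open_type : String) (close_type : String) (intermediate_type : Option String) (out : Option Int) : Prop := out = find_matching_block_end_py_alt steps current_index open_type close_type intermediate_type
instance (steps : List (List (String × String))) (current_index : Int) (open_type : String) (close_type : String) (intermediate_type : Option String) (out : Option Int) : Decidable (Spec_find_matching_block_end_py steps current_index open_type close_type intermediate_type out) := by unfold Spec_find_matching_block_end_py; infer_instance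

-- ===== CLAIM (what is proved, stated in full; the proofs are below) =====
def Claim_equal_find_matching_block_end_py : Prop := ∀ (steps : List (List (String × String))) (current_index : Int) (open_type : String) (close_type : String) (intermediate_type : Option String), Dom_find_matching_block_end_py steps current_index open_type close_type intermediate_type → Pre_find_matching_block_end_py steps current_index open_type close_type intermediate_type → Spec_find_matching_block_end_py steps current_index open_type close_type intermediate_type (find_matching_block_end_py steps current_index open_type close_type intermediate_type)

-- ===== LEMMAS AND PROOFS =====

theorem pv_bfind_le (steps : List (List (String × String))) (ot ct : String) :
    ∀ (fuel : Nat) (i j : Int), pvBfind steps ot ct fuel i = some j →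
      i ≤ j ∧ j < (steps.length : Int) := by
  intro fuel
  induction fuel with
  | zero => intro i j h; simp [pvBfind] at h
  | succ f ih =>
    intro i j h
    simp only [pvBfind] at h
    by_cases hsi : i < (steps.length : Int)
    · simp only [if_pos hsi] at h
      cases hg : PySem.List.pyGet? steps i with
      | none => rw [hg] at h; simp at h
      | some step =>
        rw [hg] at h
        simp only at h
        by_cases ho : pvStype step = some ot
        · simp only [if_pos ho] at h
          cases hb : pvBfind steps ot ct f (i+1) with
          | none => rw [hb] at h; simp at h
          | some j0 =>
            rw [hb] at h; simp only at h
            have h1 := ih _ _ hb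
            have h2 := ih _ _ h
            omega
        · simp only [if_neg ho] at h
          by_cases hc : pvStype step = some ct
          · simp only [if_pos hc] at h
            cases h
            exact ⟨le_refl _, hsi⟩
          · simp only [if_neg hc] at h
            have := ih _ _ h
            omega
    · simp [if_neg hsi] at h

theorem pv_bfind_fuel (steps : List (List (String × String))) (ot ct : String) :
    ∀ (n f g : Nat) (i : Int), ((steps.length : Int) - i).toNat ≤ n → n < f → n < g →
      pvBfind steps ot ct f i = pvBfind steps ot ct g i := by
  intro n
  induction n with
  | zero =>
    intro f g i hn hf hg
    obtain ⟨f', rfl⟩ : ∃ f', f = f' + 1 := ⟨f - 1, by omega⟩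
    obtain ⟨g', rfl⟩ : ∃ g', g = g' + 1 := ⟨g - 1, by omega⟩
    have hsi : ¬ i < (steps.length : Int) := by omega
    simp [pvBfind, hsi]
  | succ n ih =>
    intro f g i hn hf hg
    obtain ⟨f', rfl⟩ : ∃ f', f = f' + 1 := ⟨f - 1, by omega⟩
    obtain ⟨g', rfl⟩ : ∃ g', g = g' + 1 := ⟨g - 1, by omega⟩
    by_cases hsi : i < (steps.length : Int)
    · simp only [pvBfind, if_pos hsi]
      cases hg2 : PySem.List.pyGet? steps i with
      | none => rfl
      | some step =>
        simp only
        by_cases ho : pvStype step = some ot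
        · simp only [if_pos ho]
          have hnext : ((steps.length : Int) - (i+1)).toNat ≤ n := by omega
          rw [ih f' g' (i+1) hnext (by omega) (by omega)]
          cases hb : pvBfind steps ot ct g' (i+1) with
          | none => rfl
          | some j =>
            have hj := pv_bfind_le steps ot ct g' (i+1) j hb
            exact ih f' g' (j+1) (by omega) (by omega) (by omega)
        · simp only [if_neg ho]
          by_cases hc : pvStype step = some ct
          · simp [if_pos hc]
          · simp only [if_neg hc]
            exact ih f' g' (i+1) (by omega) (by omega) (by omega)
    · simp [pvBfind, hsi]

theorem pv_btop_fuel (steps : List (List (String × String))) (ot ct : String) (it : Option String) :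
    ∀ (n f g : Nat) (i : Int), ((steps.length : Int) - i).toNat ≤ n → n < f → n < g →
      pvBtop steps ot ct it f i = pvBtop steps ot ct it g i := by
  intro n
  induction n with
  | zero =>
    intro f g i hn hf hg
    obtain ⟨f', rfl⟩ : ∃ f', f = f' + 1 := ⟨f - 1, by omega⟩
    obtain ⟨g', rfl⟩ : ∃ g', g = g' + 1 := ⟨g - 1, by omega⟩
    have hsi : ¬ i < (steps.length : Int) := by omega
    simp [pvBtop, hsi]
  | succ n ih =>
    intro f g i hn hf hg
    obtain ⟨f', rfl⟩ : ∃ f', f = f' + 1 := ⟨f - 1, by omega⟩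
    obtain ⟨g', rfl⟩ : ∃ g', g = g' + 1 := ⟨g - 1, by omega⟩
    by_cases hsi : i < (steps.length : Int)
    · simp only [pvBtop, if_pos hsi]
      cases hg2 : PySem.List.pyGet? steps i with
      | none => rfl
      | some step =>
        simp only
        by_cases ho : pvStype step = some ot
        · simp only [if_pos ho]
          have hnext : ((steps.length : Int) - (i+1)).toNat ≤ n := by omega
          rw [pv_bfind_fuel steps ot ct n f' g' (i+1) hnext (by omega) (by omega)]
          cases hb : pvBfind steps ot ct g' (i+1) with
          | none => rfl
          | some j =>
            have hj := pv_bfind_le steps ot ct g' (i+1) j hb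
            exact ih f' g' (j+1) (by omega) (by omega) (by omega)
        · simp only [if_neg ho]
          by_cases hh : pvInterHit it (pvStype step) = true
          · simp [hh]
          · simp only [Bool.not_eq_true] at hh
            simp only [hh]
            by_cases hc : pvStype step = some ct
            · simp [if_pos hc]
            · simp only [if_neg hc, if_neg (by simp : ¬ (false = true))]
              exact ih f' g' (i+1) (by omega) (by omega) (by omega)
    · simp [pvBtop, hsi]

theorem pv_M (steps : List (List (String × String))) (ot ct : String) (it : Option String) :
    ∀ (n : Nat) (si L : Int), ((steps.length : Int) - si).toNat ≤ n → 1 ≤ L →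
      pvAgo steps ot ct it (((steps.length : Int) - si).toNat + 1) L si =
        (if L = 1 then pvBtop steps ot ct it (((steps.length : Int) - si).toNat + 1) si
         else match pvBfind steps ot ct (((steps.length : Int) - si).toNat + 1) si with
              | none => none
              | some j => pvAgo steps ot ct it (((steps.length : Int) - (j+1)).toNat + 1) (L-1) (j+1)) := by
  intro n
  induction n using Nat.strong_induction_on with
  | _ n ih =>
  intro si L hn hL
  by_cases hsi : si < (steps.length : Int)
  · have hm : ((steps.length : Int) - si).toNat = ((steps.length : Int) - (si+1)).toNat + 1 := by omega
    set m' : Nat := ((steps.length : Int) - (si+1)).toNat with hm'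
    rw [hm]
    cases hg : PySem.List.pyGet? steps si with
    | none =>
      simp only [pvAgo, pvBtop, pvBfind, if_pos hsi, hg]
      split <;> rfl
    | some step =>
      by_cases ho : pvStype step = some ot
      · -- open branch
        have hlhs : pvAgo steps ot ct it (m' + 1 + 1) L si
            = pvAgo steps ot ct it (m' + 1) (L + 1) (si + 1) := by
          simp only [pvAgo, if_pos hsi, hg, ho, if_pos]
        have hmeas : m' < n := by omega
        have IH1 := ih m' hmeas (si+1) (L+1) (le_refl m') (by omega)
        rw [if_neg (by omega : ¬ L + 1 = 1)] at IH1
        rw [hlhs, IH1]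
        by_cases hL1 : L = 1
        · subst hL1
          rw [if_pos rfl]
          have hrhs : pvBtop steps ot ct it (m' + 1 + 1) si
              = (match pvBfind steps ot ct (m' + 1) (si + 1) with
                 | none => none
                 | some j => pvBtop steps ot ct it (m' + 1) (j + 1)) := by
            simp only [pvBtop, if_pos hsi, hg, ho, if_pos]
          rw [hrhs]
          cases hb : pvBfind steps ot ct (m' + 1) (si + 1) with
          | none => rfl
          | some j =>
            have hj := pv_bfind_le steps ot ct (m'+1) (si+1) j hb
            have hjm : ((steps.length : Int) - (j+1)).toNat < n := by omega
            have IH2 := ih _ hjm (j+1) 1 (le_refl _) (by omega)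
            rw [if_pos rfl] at IH2
            simp only
            rw [show (1:Int) + 1 - 1 = 1 from by norm_num]
            rw [IH2]
            exact pv_btop_fuel steps ot ct it (((steps.length : Int) - (j+1)).toNat) _ _ (j+1)
              (le_refl _) (by omega) (by omega)
        · rw [if_neg hL1]
          have hrhs : pvBfind steps ot ct (m' + 1 + 1) si
              = (match pvBfind steps ot ct (m' + 1) (si + 1) with
                 | none => none
                 | some j => pvBfind steps ot ct (m' + 1) (j + 1)) := by
            simp only [pvBfind, if_pos hsi, hg, ho, if_pos]
          rw [hrhs]
          cases hb : pvBfind steps ot ct (m' + 1) (si + 1) with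
          | none => rfl
          | some j =>
            have hj := pv_bfind_le steps ot ct (m'+1) (si+1) j hb
            have hjm : ((steps.length : Int) - (j+1)).toNat < n := by omega
            have IH2 := ih _ hjm (j+1) L (le_refl _) (by omega)
            rw [if_neg hL1] at IH2
            simp only
            rw [show L + 1 - 1 = L by omega, IH2]
            rw [pv_bfind_fuel steps ot ct (((steps.length : Int) - (j+1)).toNat) (m'+1)
                (((steps.length : Int) - (j+1)).toNat + 1) (j+1) (le_refl _) (by omega) (by omega)]
      · -- not open
        by_cases hL1 : L = 1
        · subst hL1
          rw [if_pos rfl]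
          by_cases hh : pvInterHit it (pvStype step) = true
          · -- intermediate hit at level 1
            simp only [pvAgo, pvBtop, if_pos hsi, hg, ho, hh]
            simp
          · by_cases hc : pvStype step = some ct
            · simp only [pvAgo, pvBtop, if_pos hsi, hg, if_neg ho, hh]
              simp [hc]
            · have hlhs : pvAgo steps ot ct it (m' + 1 + 1) 1 si
                  = pvAgo steps ot ct it (m' + 1) 1 (si + 1) := by
                simp only [pvAgo, if_pos hsi, hg, if_neg ho, hh]
                simp [hc]
              have hrhs : pvBtop steps ot ct it (m' + 1 + 1) si
                  = pvBtop steps ot ct it (m' + 1) (si + 1) := by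
                simp only [pvBtop, if_pos hsi, hg, if_neg ho, hh]
                simp [hc]
              have IH1 := ih m' (by omega) (si+1) 1 (le_refl m') (by omega)
              rw [if_pos rfl] at IH1
              rw [hlhs, hrhs, IH1]
        · -- level ≥ 2
          rw [if_neg hL1]
          have hL2 : (2:Int) ≤ L := by omega
          have hLb : (L == 1) = false := by simp; omega
          by_cases hc : pvStype step = some ct
          · have hlhs : pvAgo steps ot ct it (m' + 1 + 1) L si
                = pvAgo steps ot ct it (m' + 1) (L - 1) (si + 1) := by
              simp only [pvAgo, if_pos hsi, hg, if_neg ho, hLb, Bool.and_false]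
              simp [hc]
              omega
            have hrhs : pvBfind steps ot ct (m' + 1 + 1) si = some si := by
              simp only [pvBfind, if_pos hsi, hg, if_neg ho]
              simp [hc]
            rw [hlhs, hrhs]
          · have hlhs : pvAgo steps ot ct it (m' + 1 + 1) L si
                = pvAgo steps ot ct it (m' + 1) L (si + 1) := by
              simp only [pvAgo, if_pos hsi, hg, if_neg ho, hLb, Bool.and_false]
              simp [hc]
            have hrhs : pvBfind steps ot ct (m' + 1 + 1) si
                = pvBfind steps ot ct (m' + 1) (si + 1) := by
              simp only [pvBfind, if_pos hsi, hg, if_neg ho]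
              simp [hc]
            have IH1 := ih m' (by omega) (si+1) L (le_refl m') (by omega)
            rw [if_neg hL1] at IH1
            rw [hlhs, hrhs, IH1]
  · have hm : ((steps.length : Int) - si).toNat = 0 := by omega
    rw [hm]
    simp only [pvAgo, pvBtop, pvBfind, if_neg hsi]
    split <;> rfl

-- ===== VERDICT (by name: the statement is the Claim_ definition above) =====
theorem find_matching_block_end_py_spec : Claim_equal_find_matching_block_end_py := by
  unfold Claim_equal_find_matching_block_end_py
  intro steps current_index open_type close_type intermediate_type _ _
  unfold Spec_find_matching_block_end_py find_matching_block_end_py find_matching_block_end_py_alt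
  have h := pv_M steps open_type close_type intermediate_type
    (((steps.length : Int) - (current_index + 1)).toNat) (current_index + 1) 1 (le_refl _) (by norm_num)
  rw [if_pos rfl] at h
  exact h
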